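-- pv_equiv track=rewrite | github.com/TheForecastCompany/aimarketingagent | backend/core/optimized_content_creators.py | _extract_conclusion
-- ===== SOURCE A (Python) =====
-- from typing import Dict, Any, Optional, List
--
-- def _extract_conclusion(content: str) -> Dict:
--     """Extract conclusion section"""
--     lines = content.split('\n')
--     conclusion_lines = []
--     in_conclusion = False
--
--     for line in lines:
--         if 'conclusion' in line.lower() or line.strip().startswith('#'):
--             in_conclusion = True
--         if in_conclusion:
--             conclusion_lines.append(line)
--
--     return {
--         "summary": " ".join(conclusion_lines[:2]) if conclusion_lines else "",
--         "call_to_action": "Share your thoughts below",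
--         "next_steps": "Subscribe for updates"
--     }
-- ===== SOURCE B (Python) =====
-- def _extract_conclusion(content: str) -> dict:
--     """Extract conclusion section (locate-then-slice)."""
--     lines = content.split('\n')
--     idx = next((i for i, line in enumerate(lines)
--                 if 'conclusion' in line.lower() or line.strip().startswith('#')), None)
--     summary = "" if idx is None else " ".join(lines[idx:idx + 2])
--     return {
--         "summary": summary,
--         "call_to_action": "Share your thoughts below",
--         "next_steps": "Subscribe for updates"
--     }
-- ===== Notes on version B (the rewrite author's own statement) =====
-- stated objective: simpler
-- what changed: Replaces the flag-based accumulating loop (which copies every line from the trigger to the end) with locating the first trigger line's index and slicing the two lines lines[idx:idx+2] directly.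
import Mathlib
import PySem

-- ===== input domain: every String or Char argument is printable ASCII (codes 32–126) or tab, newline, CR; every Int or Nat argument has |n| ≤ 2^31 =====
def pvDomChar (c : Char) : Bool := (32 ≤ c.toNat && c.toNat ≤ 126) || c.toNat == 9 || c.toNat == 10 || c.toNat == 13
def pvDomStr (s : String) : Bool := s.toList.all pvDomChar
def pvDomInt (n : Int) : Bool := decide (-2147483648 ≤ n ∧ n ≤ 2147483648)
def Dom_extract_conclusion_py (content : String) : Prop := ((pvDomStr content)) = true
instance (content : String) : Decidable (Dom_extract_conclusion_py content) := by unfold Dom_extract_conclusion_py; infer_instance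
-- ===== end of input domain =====

-- B replaces A's flag-based accumulating loop by locating the first trigger line's index and slicing two lines; objective: simpler.

-- ===== PORT A =====
-- the loop body of A: state = (in_conclusion, conclusion_lines)
def pvStepA (s : Bool × List String) (line : String) : Bool × List String :=
  let in_conclusion :=
    if PySem.Str.isIn "conclusion" (PySem.Str.lower line) ||
       PySem.Str.startswith (PySem.Str.strip line) "#" then true else s.1
  (in_conclusion, if in_conclusion then s.2 ++ [line] else s.2)

def extract_conclusion_py (content : String) : List (String × String) :=
  let lines := (PySem.Str.split? content "\n").getD []  -- sep "\n" ≠ "" so split? is always some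
  let st := lines.foldl pvStepA (false, [])
  let conclusion_lines := st.2
  [("summary", if conclusion_lines ≠ [] then
      PySem.Str.join " " (PySem.List.slice conclusion_lines none (some 2)) else ""),
   ("call_to_action", "Share your thoughts below"),
   ("next_steps", "Subscribe for updates")]

-- ===== PORT B =====
def pvTrigger (line : String) : Bool :=
  PySem.Str.isIn "conclusion" (PySem.Str.lower line) ||
  PySem.Str.startswith (PySem.Str.strip line) "#"

def extract_conclusion_py_alt (content : String) : List (String × String) :=
  let lines := (PySem.Str.split? content "\n").getD []
  let summary := match lines.findIdx? pvTrigger with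
    | none => ""
    | some i => PySem.Str.join " " (PySem.List.slice lines (some (i : Int)) (some ((i : Int) + 2)))
  [("summary", summary),
   ("call_to_action", "Share your thoughts below"),
   ("next_steps", "Subscribe for updates")]

-- ===== PRECONDITION & SPEC =====
def Spec_extract_conclusion_py (content : String) (out : List (String × String)) : Prop := out = extract_conclusion_py_alt content
instance (content : String) (out : List (String × String)) : Decidable (Spec_extract_conclusion_py content out) := by unfold Spec_extract_conclusion_py; infer_instance

-- ===== CLAIM (what is proved, stated in full; the proofs are below) =====
def Claim_equal_extract_conclusion_py : Prop := ∀ (content : String), Dom_extract_conclusion_py content → Spec_extract_conclusion_py content (extract_conclusion_py content)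

-- ===== LEMMAS AND PROOFS =====

-- once the flag is true, A's loop appends every remaining line
lemma pvFoldA_true (lines : List String) : ∀ acc : List String,
    lines.foldl pvStepA (true, acc) = (true, acc ++ lines) := by
  induction lines with
  | nil => simp
  | cons l rest ih =>
    intro acc
    simp [List.foldl_cons, pvStepA, ih]

-- A's accumulated lines are exactly the suffix from the first trigger line
lemma pvFoldA_eq_drop (lines : List String) :
    (lines.foldl pvStepA (false, [])).2 =
      match lines.findIdx? pvTrigger with
      | none => []
      | some i => lines.drop i := by
  induction lines with
  | nil => simp
  | cons l rest ih =>
    cases h : pvTrigger l with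
    | true =>
      have hstep : pvStepA (false, []) l = (true, [l]) := by
        unfold pvTrigger at h; unfold pvStepA; rw [h]; simp
      simp [List.foldl_cons, hstep, pvFoldA_true, List.findIdx?_cons, h]
    | false =>
      have hstep : pvStepA (false, []) l = (false, []) := by
        unfold pvTrigger at h; unfold pvStepA; rw [h]; simp
      simp only [List.foldl_cons, hstep, List.findIdx?_cons, h]
      rw [ih]
      cases hf : rest.findIdx? pvTrigger <;> simp

lemma pvFindIdx?_lt {lines : List String} {i : Nat}
    (h : lines.findIdx? pvTrigger = some i) : i < lines.length :=
  List.findIdx?_eq_some_iff_findIdx_eq.mp h |>.1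

-- ===== VERDICT (by name: the statement is the Claim_ definition above) =====
theorem extract_conclusion_py_spec : Claim_equal_extract_conclusion_py := by
  intro content _
  unfold Spec_extract_conclusion_py extract_conclusion_py extract_conclusion_py_alt
  simp only []
  set lines := (PySem.Str.split? content "\n").getD [] with hl
  have hfold := pvFoldA_eq_drop lines
  cases hf : lines.findIdx? pvTrigger with
  | none =>
    rw [hf] at hfold
    simp [hfold]
  | some i =>
    rw [hf] at hfold
    have hi : i < lines.length := pvFindIdx?_lt hf
    have hne : lines.drop i ≠ [] := by
      intro h
      have := List.drop_eq_nil_iff.mp h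
      omega
    rw [hfold]
    simp only [hne, if_true, ne_eq, not_false_iff]
    have h2 : PySem.List.slice (lines.drop i) none (some 2) = (lines.drop i).take 2 := by
      have := PySem.List.slice_to_natCast (lines.drop i) 2
      simpa using this
    have h3 : PySem.List.slice lines (some (i : Int)) (some ((i : Int) + 2)) =
        (lines.drop i).take 2 := by
      have := PySem.List.slice_natCast_add lines i 2
      simpa using this
    rw [h2, h3]
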